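-- pv_equiv track=rewrite | github.com/justjot-ai/jotty | core/orchestration/v2/templates/swarm_lean.py | clean_task_for_execution
-- ===== SOURCE A (Python) =====
-- def clean_task_for_execution(task: str) -> str:
--     """
--     Clean task string for execution.
--
--     Removes any polluting context like Q-learning lessons,
--     transfer learning suggestions, etc.
--     """
--     # Markers that indicate enrichment context (to be stripped)
--     context_markers = [
--         '\n[Multi-Perspective Analysis',
--         '\nLearned Insights:',
--         '\n# Transferable Learnings',
--         '\n# Q-Learning Lessons',
--         '\n## Task Type Pattern',
--         '\n## Role Advice',
--         '\n## Meta-Learning Advice',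
--         '\n\n---\n',  # Common separator before context
--     ]
--
--     cleaned = task
--     for marker in context_markers:
--         if marker in cleaned:
--             cleaned = cleaned.split(marker)[0]
--
--     return cleaned.strip()
-- ===== SOURCE B (Python) =====
-- def clean_task_for_execution(task: str) -> str:
--     """Clean task string for execution (re-implementation).
--
--     Instead of repeatedly splitting and reassigning the string, track a single
--     integer cut position: for each marker, search the original string up to the
--     current cut (so a marker straddling an earlier cut is ignored, exactly as
--     when it disappears from the truncated string), then slice once at the end.
--     """
--     context_markers = [
--         '\n[Multi-Perspective Analysis',
--         '\nLearned Insights:',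
--         '\n# Transferable Learnings',
--         '\n# Q-Learning Lessons',
--         '\n## Task Type Pattern',
--         '\n## Role Advice',
--         '\n## Meta-Learning Advice',
--         '\n\n---\n',
--     ]
--
--     def cut_before(cut, markers):
--         if not markers:
--             return cut
--         p = task.find(markers[0], 0, cut)
--         return cut_before(cut if p == -1 else p, markers[1:])
--
--     return task[:cut_before(len(task), context_markers)].strip()
-- ===== Notes on version B (the rewrite author's own statement) =====
-- stated objective: alternative
-- what changed: B replaces A's repeated split-and-reassign string truncation with a single integer cut position threaded through a recursive pass over the markers (bounded str.find on the original string) and one final slice+strip.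
import Mathlib
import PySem

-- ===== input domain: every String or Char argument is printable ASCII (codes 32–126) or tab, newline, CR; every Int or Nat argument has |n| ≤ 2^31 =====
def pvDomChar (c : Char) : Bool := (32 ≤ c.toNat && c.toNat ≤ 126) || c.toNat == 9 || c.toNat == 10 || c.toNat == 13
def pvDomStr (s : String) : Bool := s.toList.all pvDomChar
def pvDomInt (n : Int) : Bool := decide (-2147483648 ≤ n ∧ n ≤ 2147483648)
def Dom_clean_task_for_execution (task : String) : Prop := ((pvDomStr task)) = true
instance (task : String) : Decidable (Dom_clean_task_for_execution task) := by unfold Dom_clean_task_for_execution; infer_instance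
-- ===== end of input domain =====

-- B replaces A's repeated split-and-reassign truncation with a single integer cut
-- position (bounded find on the original string) and one final slice+strip; same
-- return value, an alternative decomposition rather than a speed claim.

-- ===== PORT A =====
-- the enrichment-context marker list (pure data, the same literal in Source A and Source B; shared by both ports)
def pvContextMarkers : List (List Char) :=
  ["\n[Multi-Perspective Analysis".toList,
   "\nLearned Insights:".toList,
   "\n# Transferable Learnings".toList,
   "\n# Q-Learning Lessons".toList,
   "\n## Task Type Pattern".toList,
   "\n## Role Advice".toList,
   "\n## Meta-Learning Advice".toList,
   "\n\n---\n".toList]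

-- A's loop, on List Char (PySem string primitives are defined there; Str.* are thin wrappers).
-- 'cleaned.split(marker)[0]': split on a nonempty separator is never empty, so Python's [0] never raises;
-- pyGetD's default [] is unreachable.
def clean_task_for_execution (task : String) : String :=
  let cleaned := pvContextMarkers.foldl
    (fun cleaned marker =>
      if PySem.Chars.isIn marker cleaned then
        PySem.List.pyGetD (PySem.Chars.splitOn cleaned marker) 0 []
      else cleaned)
    task.toList
  String.ofList (PySem.Chars.strip cleaned)

-- ===== PORT B =====
-- Source B's recursive helper cut_before: p = task.find(m, 0, cut); cut := cut if p == -1 else p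
def pvCutBefore (task : List Char) (cut : Int) : List (List Char) → Int
  | [] => cut
  | m :: ms =>
      let p := PySem.Chars.findFrom task m 0 (some cut)
      pvCutBefore task (if p = -1 then cut else p) ms

-- task[:cut_before(len(task), context_markers)].strip()
def clean_task_for_execution_alt (task : String) : String :=
  String.ofList (PySem.Chars.strip
    (PySem.Chars.slice task.toList none
      (some (pvCutBefore task.toList ((task.toList.length : Int)) pvContextMarkers))))

-- ===== PRECONDITION & SPEC =====
def Spec_clean_task_for_execution (task : String) (out : String) : Prop := out = clean_task_for_execution_alt task
instance (task : String) (out : String) : Decidable (Spec_clean_task_for_execution task out) := by unfold Spec_clean_task_for_execution; infer_instance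

-- ===== CLAIM (what is proved, stated in full; the proofs are below) =====
def Claim_equal_clean_task_for_execution : Prop := ∀ (task : String), Dom_clean_task_for_execution task → Spec_clean_task_for_execution task (clean_task_for_execution task)

-- ===== LEMMAS AND PROOFS =====

-- find.go at offset k is find at offset 0, shifted
theorem pv_find_go (sub : List Char) : ∀ (l : List Char) (k : Nat),
    PySem.Chars.find.go sub l k =
      if PySem.Chars.find l sub = -1 then -1 else (k : Int) + PySem.Chars.find l sub := by
  intro l
  induction l with
  | nil =>
      intro k
      simp only [PySem.Chars.find, PySem.Chars.find.go]
      split_ifs <;> simp_all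
  | cons c t ih =>
      intro k
      rw [PySem.Chars.find.go.eq_2, PySem.Chars.find, PySem.Chars.find.go.eq_2]
      by_cases hp : sub.isPrefixOf (c :: t)
      · simp [hp]
      · simp only [hp, Bool.false_eq_true, if_false]
        rw [ih (k + 1), ih 1]
        have hb := PySem.Chars.neg_one_le_find t sub
        split_ifs with h h1 h1 <;> push_cast <;> omega

-- find on a cons that is not matched at position 0
theorem pv_find_cons_not_prefix (sub : List Char) (c : Char) (t : List Char)
    (h : sub.isPrefixOf (c :: t) = false) :
    PySem.Chars.find (c :: t) sub =
      if PySem.Chars.find t sub = -1 then -1 else 1 + PySem.Chars.find t sub := by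
  rw [PySem.Chars.find, PySem.Chars.find.go.eq_2]
  simp only [h, Bool.false_eq_true, if_false]
  exact pv_find_go sub t 1

-- find on a cons matched at position 0
theorem pv_find_cons_prefix (sub : List Char) (c : Char) (t : List Char)
    (h : sub.isPrefixOf (c :: t) = true) :
    PySem.Chars.find (c :: t) sub = 0 := by
  rw [PySem.Chars.find, PySem.Chars.find.go.eq_2]
  simp [h]

-- once something has been pushed on the accumulator, the head of splitOn.go's result is fixed
theorem pv_splitOn_go_acc (sep : List Char) : ∀ (fuel : Nat) (l cur : List Char)
    (acc : List (List Char)) (x : List Char),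
    PySem.List.pyGetD (PySem.Chars.splitOn.go sep fuel l cur (acc ++ [x])) 0 [] = x := by
  intro fuel
  induction fuel with
  | zero =>
      intro l cur acc x
      rw [PySem.Chars.splitOn.go]
      simp
  | succ fuel ih =>
      intro l cur acc x
      cases l with
      | nil =>
          rw [PySem.Chars.splitOn.go]
          · simp
          · omega
      | cons c rest =>
          rw [PySem.Chars.splitOn.go]
          by_cases hp : sep.isPrefixOf (c :: rest)
          · simp only [hp, if_pos]
            have : cur.reverse :: (acc ++ [x]) = (cur.reverse :: acc) ++ [x] := by simp
            rw [this, ih]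
          · simp only [hp, Bool.false_eq_true, if_false]
            exact ih rest (c :: cur) acc x

-- with empty accumulator, the head of splitOn.go is the text up to the first separator occurrence
theorem pv_splitOn_go_head (sep : List Char) : ∀ (fuel : Nat) (l cur : List Char),
    0 ≤ PySem.Chars.find l sep → PySem.Chars.find l sep < (fuel : Int) →
    PySem.List.pyGetD (PySem.Chars.splitOn.go sep fuel l cur []) 0 [] =
      cur.reverse ++ l.take (PySem.Chars.find l sep).toNat := by
  intro fuel
  induction fuel with
  | zero => intro l cur h0 h1; omega
  | succ fuel ih =>
      intro l cur h0 h1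
      cases l with
      | nil =>
          rw [PySem.Chars.splitOn.go]
          have hsep : sep.isEmpty = true := by
            by_contra hne
            have : PySem.Chars.find [] sep = -1 := by
              rw [PySem.Chars.find, PySem.Chars.find.go]
              simp [hne]
            omega
          have hfind : PySem.Chars.find [] sep = 0 := by
            rw [PySem.Chars.find, PySem.Chars.find.go]
            simp [hsep]
          · simp [hfind]
          · omega
      | cons c rest =>
          rw [PySem.Chars.splitOn.go]
          by_cases hp : sep.isPrefixOf (c :: rest)
          · simp only [hp, if_pos]
            have hfind := pv_find_cons_prefix sep c rest hp
            rw [hfind]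
            have : cur.reverse :: ([] : List (List Char)) = [] ++ [cur.reverse] := by simp
            rw [this, pv_splitOn_go_acc]
            simp
          · simp only [hp, Bool.false_eq_true, if_false]
            have hfind := pv_find_cons_not_prefix sep c rest (Bool.eq_false_iff.mpr hp)
            by_cases hneg : PySem.Chars.find rest sep = -1
            · rw [hfind] at h0; simp [hneg] at h0
            · have hr0 : 0 ≤ PySem.Chars.find rest sep := by
                have := PySem.Chars.neg_one_le_find rest sep
                omega
              have hval : PySem.Chars.find (c :: rest) sep = 1 + PySem.Chars.find rest sep := by
                rw [hfind]; simp [hneg]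
              rw [ih rest (c :: cur) hr0 (by rw [hval] at h1; push_cast at h1 ⊢; omega)]
              rw [hval]
              have : (1 + PySem.Chars.find rest sep).toNat = (PySem.Chars.find rest sep).toNat + 1 := by omega
              simp [this]

-- head of Python's s.split(sep) when sep occurs in s
theorem pv_splitOn_head (s sep : List Char) (h : 0 ≤ PySem.Chars.find s sep) :
    PySem.List.pyGetD (PySem.Chars.splitOn s sep) 0 [] =
      s.take (PySem.Chars.find s sep).toNat := by
  rw [PySem.Chars.splitOn]
  have hle := PySem.Chars.find_le_length s sep
  have := pv_splitOn_go_head sep (s.length + 1) s [] h (by push_cast; omega)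
  simpa using this

-- task.find(m, 0, cut) is find on the prefix task[:cut]
theorem pv_findFrom_take (t m : List Char) (cut : Int) (h0 : 0 ≤ cut)
    (h1 : cut ≤ (t.length : Int)) :
    PySem.Chars.findFrom t m 0 (some cut) = PySem.Chars.find (t.take cut.toNat) m := by
  have hb := PySem.Chars.neg_one_le_find (t.take cut.toNat) m
  simp only [PySem.Chars.findFrom]
  split_ifs <;> simp_all <;> omega

-- invariant: A's running string is the take of B's running cut index
theorem pv_main (t : List Char) : ∀ (ms : List (List Char)) (cut : Int),
    0 ≤ cut → cut ≤ (t.length : Int) →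
    (ms.foldl
        (fun cleaned marker =>
          if PySem.Chars.isIn marker cleaned then
            PySem.List.pyGetD (PySem.Chars.splitOn cleaned marker) 0 []
          else cleaned)
        (t.take cut.toNat)
      = t.take (pvCutBefore t cut ms).toNat)
    ∧ 0 ≤ pvCutBefore t cut ms ∧ pvCutBefore t cut ms ≤ cut := by
  intro ms
  induction ms with
  | nil => intro cut h0 h1; exact ⟨rfl, h0, le_refl _⟩
  | cons m ms ih =>
      intro cut h0 h1
      have hff : PySem.Chars.findFrom t m 0 (some cut) = PySem.Chars.find (t.take cut.toNat) m :=
        pv_findFrom_take t m cut h0 h1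
      simp only [List.foldl_cons, pvCutBefore, hff]
      by_cases hneg : PySem.Chars.find (t.take cut.toNat) m = -1
      · have hnotin : PySem.Chars.isIn m (t.take cut.toNat) = false := by
          rw [PySem.Chars.isIn_eq_false_iff]
          exact (PySem.Chars.find_eq_neg_one_iff _ _).mp hneg
        simp only [hneg, if_pos, hnotin, Bool.false_eq_true, if_false]
        exact ih cut h0 h1
      · have hp0 : 0 ≤ PySem.Chars.find (t.take cut.toNat) m := by
          have := PySem.Chars.neg_one_le_find (t.take cut.toNat) m
          omega
        have hin : PySem.Chars.isIn m (t.take cut.toNat) = true := by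
          rw [PySem.Chars.isIn_iff_infix]
          exact (PySem.Chars.find_nonneg_iff _ _).mp hp0
        have hple : PySem.Chars.find (t.take cut.toNat) m ≤ cut := by
          have := PySem.Chars.find_le_length (t.take cut.toNat) m
          simp only [List.length_take] at this
          omega
        simp only [hneg, if_false, hin, if_pos]
        rw [pv_splitOn_head _ _ hp0, List.take_take]
        have hmin : min (PySem.Chars.find (t.take cut.toNat) m).toNat cut.toNat
            = (PySem.Chars.find (t.take cut.toNat) m).toNat := by omega
        rw [hmin]
        have := ih (PySem.Chars.find (t.take cut.toNat) m) hp0 (by omega)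
        exact ⟨this.1, this.2.1, le_trans this.2.2 hple⟩

-- ===== VERDICT (by name: the statement is the Claim_ definition above) =====
theorem clean_task_for_execution_spec : Claim_equal_clean_task_for_execution := by
  intro task _
  unfold Spec_clean_task_for_execution clean_task_for_execution clean_task_for_execution_alt
  have h := pv_main task.toList pvContextMarkers ((task.toList.length : Int)) (by positivity) (le_refl _)
  have hstart : task.toList.take ((task.toList.length : Int)).toNat = task.toList := by
    simp
  rw [hstart] at h
  have hs := PySem.List.slice_to task.toList h.2.1
  simp only [String.length_toList] at h hs
  simp [h.1, hs]
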